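-- pv_equiv track=rewrite | github.com/AkaSec-1337-CyberSecurity-Club/CyberOdyssey_2024_Qualifications | Pwn/fizzbuzz/x.py | pass_tests
-- ===== SOURCE A (Python) =====
-- def pass_tests(shellcode):
--     x = False
--     for p in shellcode:
--         if (x == False ):
--             x = True
--             if (p % 3 != 0):
--                 return (False)
--         else :
--             x = False
--             if (p % 5 != 0):
--                 return (False)
--     return (True);
-- ===== SOURCE B (Python) =====
-- def pass_tests(shellcode):
--     s = list(shellcode)
--     return (all(s[i] % 3 == 0 for i in range(0, len(s), 2))
--             and all(s[i] % 5 == 0 for i in range(1, len(s), 2)))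
-- ===== Notes on version B (the rewrite author's own statement) =====
-- stated objective: simpler
-- what changed: Replaces A's single interleaved pass with a parity toggle and early returns by two position-partitioned scans (all even indices checked for divisibility by 3, all odd indices for divisibility by 5) combined with a boolean conjunction.
import Mathlib
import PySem

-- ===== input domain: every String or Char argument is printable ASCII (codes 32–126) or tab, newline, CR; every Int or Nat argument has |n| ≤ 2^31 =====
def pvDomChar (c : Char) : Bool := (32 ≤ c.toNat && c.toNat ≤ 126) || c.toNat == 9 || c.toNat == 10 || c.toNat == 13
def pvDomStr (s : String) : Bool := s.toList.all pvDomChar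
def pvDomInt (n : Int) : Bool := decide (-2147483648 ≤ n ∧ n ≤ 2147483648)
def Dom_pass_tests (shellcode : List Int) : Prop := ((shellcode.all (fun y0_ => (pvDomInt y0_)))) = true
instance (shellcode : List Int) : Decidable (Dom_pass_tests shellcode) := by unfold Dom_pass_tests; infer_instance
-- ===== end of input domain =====

-- B replaces A's single interleaved pass with a parity toggle by two position-partitioned
-- scans (even indices divisible by 3, odd indices divisible by 5); objective: simpler.

-- ===== PORT A =====
-- the for-loop over `shellcode` with the toggle `x` and early returns
def pvPassLoop : List Int → Bool → Bool
  | [], _ => true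
  | p :: rest, x =>
    if x = false then
      if PySem.Int.mod p 3 ≠ 0 then false
      else pvPassLoop rest true
    else
      if PySem.Int.mod p 5 ≠ 0 then false
      else pvPassLoop rest false

def pass_tests (shellcode : List Int) : Bool := pvPassLoop shellcode false

-- ===== PORT B =====
-- Source B: all(s[i] % 3 == 0 for i in range(0, len(s), 2)) and all(s[i] % 5 == 0 for i in range(1, len(s), 2)).
-- `s[i]` is ported as pyGetD with default 0: every index produced by the ranges is in bounds.
def pass_tests_alt (shellcode : List Int) : Bool :=
  ((PySem.List.pyRange 0 (PySem.List.len shellcode) 2).all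
      (fun i => PySem.Int.mod (PySem.List.pyGetD shellcode i 0) 3 == 0))
  && ((PySem.List.pyRange 1 (PySem.List.len shellcode) 2).all
      (fun i => PySem.Int.mod (PySem.List.pyGetD shellcode i 0) 5 == 0))

-- ===== PRECONDITION & SPEC =====
def Spec_pass_tests (shellcode : List Int) (out : Bool) : Prop := out = pass_tests_alt shellcode
instance (shellcode : List Int) (out : Bool) : Decidable (Spec_pass_tests shellcode out) := by unfold Spec_pass_tests; infer_instance

-- ===== CLAIM (what is proved, stated in full; the proofs are below) =====
def Claim_equal_pass_tests : Prop := ∀ (shellcode : List Int), Dom_pass_tests shellcode → Spec_pass_tests shellcode (pass_tests shellcode)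

-- ===== LEMMAS AND PROOFS =====

-- two-step list induction principle shared by both characterisation lemmas
theorem pvTwoStep {P : List Int → Prop} (h0 : P []) (h1 : ∀ a, P [a])
    (h2 : ∀ a b t, P t → P (a :: b :: t)) : ∀ s, P s
  | [] => h0
  | [a] => h1 a
  | a :: b :: t => h2 a b t (pvTwoStep h0 h1 h2 t)

-- pairwise reference function both ports are reduced to
def pvChk : List Int → Bool
  | [] => true
  | [a] => PySem.Int.mod a 3 == 0
  | a :: b :: t => (PySem.Int.mod a 3 == 0) && ((PySem.Int.mod b 5 == 0) && pvChk t)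

-- the two stride-passes of B, written over Nat indices
def pvEv (s : List Int) : Bool :=
  (List.range ((s.length + 1) / 2)).all (fun k => PySem.Int.mod (s.getD (2 * k) 0) 3 == 0)
def pvOd (s : List Int) : Bool :=
  (List.range (s.length / 2)).all (fun k => PySem.Int.mod (s.getD (2 * k + 1) 0) 5 == 0)

theorem pvA_eq_chk : ∀ s, pvPassLoop s false = pvChk s := by
  refine pvTwoStep ?_ ?_ ?_
  · simp [pvPassLoop, pvChk]
  · intro a
    by_cases h : (3 : Int) ∣ a
    · simp [pvPassLoop, pvChk, Int.emod_eq_zero_of_dvd h]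
    · simp [pvPassLoop, pvChk, h]
  · intro a b t ih
    by_cases h3 : (3 : Int) ∣ a <;> by_cases h5 : (5 : Int) ∣ b
    · simp [pvPassLoop, pvChk, ih, Int.emod_eq_zero_of_dvd h3,
        Int.emod_eq_zero_of_dvd h5]
    · simp [pvPassLoop, pvChk, h3, h5]
    · simp [pvPassLoop, pvChk, h3, h5]
    · simp [pvPassLoop, pvChk, h3, h5]

theorem pvAlt_eq_evod (s : List Int) : pass_tests_alt s = (pvEv s && pvOd s) := by
  unfold pass_tests_alt pvEv pvOd
  rw [PySem.List.len_eq]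
  rw [PySem.List.pyRange_of_pos 0 (s.length : Int) (by norm_num),
      PySem.List.pyRange_of_pos 1 (s.length : Int) (by norm_num)]
  rw [List.all_map, List.all_map]
  have hc0 : (if (0 : Int) < (s.length : Int)
      then (((s.length : Int) - 0 + 2 - 1) / 2).toNat else 0) = (s.length + 1) / 2 := by
    split_ifs with h <;> omega
  have hc1 : (if (1 : Int) < (s.length : Int)
      then (((s.length : Int) - 1 + 2 - 1) / 2).toNat else 0) = s.length / 2 := by
    split_ifs with h <;> omega
  have hf0 : ((fun i => PySem.Int.mod (PySem.List.pyGetD s i 0) 3 == 0) ∘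
      (fun k : Nat => (0 : Int) + 2 * (k : Int)))
      = fun k : Nat => PySem.Int.mod (s.getD (2 * k) 0) 3 == 0 := by
    funext k
    have h : (0 : Int) + 2 * (k : Int) = ((2 * k : Nat) : Int) := by push_cast; ring
    simp only [Function.comp_apply]
    rw [h, PySem.List.pyGetD_natCast]
  have hf1 : ((fun i => PySem.Int.mod (PySem.List.pyGetD s i 0) 5 == 0) ∘
      (fun k : Nat => (1 : Int) + 2 * (k : Int)))
      = fun k : Nat => PySem.Int.mod (s.getD (2 * k + 1) 0) 5 == 0 := by
    funext k
    have h : (1 : Int) + 2 * (k : Int) = ((2 * k + 1 : Nat) : Int) := by push_cast; ring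
    simp only [Function.comp_apply]
    rw [h, PySem.List.pyGetD_natCast]
  rw [hc0, hc1, hf0, hf1]

theorem pvEv_cons2 (a b : Int) (t : List Int) :
    pvEv (a :: b :: t) = ((PySem.Int.mod a 3 == 0) && pvEv t) := by
  unfold pvEv
  simp only [List.length_cons]
  have hc : (t.length + 1 + 1 + 1) / 2 = (t.length + 1) / 2 + 1 := by omega
  rw [hc, List.range_succ_eq_map]
  simp only [List.all_cons, List.all_map]
  have hf : ((fun k => PySem.Int.mod ((a :: b :: t).getD (2 * k) 0) 3 == 0) ∘ Nat.succ)
      = fun k => PySem.Int.mod (t.getD (2 * k) 0) 3 == 0 := by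
    funext k
    have h2 : 2 * Nat.succ k = 2 * k + 1 + 1 := by omega
    simp only [Function.comp_apply, h2, List.getD_cons_succ]
  rw [hf]
  simp

theorem pvOd_cons2 (a b : Int) (t : List Int) :
    pvOd (a :: b :: t) = ((PySem.Int.mod b 5 == 0) && pvOd t) := by
  unfold pvOd
  simp only [List.length_cons]
  have hc : (t.length + 1 + 1) / 2 = t.length / 2 + 1 := by omega
  rw [hc, List.range_succ_eq_map]
  simp only [List.all_cons, List.all_map]
  have hf : ((fun k => PySem.Int.mod ((a :: b :: t).getD (2 * k + 1) 0) 5 == 0) ∘ Nat.succ)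
      = fun k => PySem.Int.mod (t.getD (2 * k + 1) 0) 5 == 0 := by
    funext k
    simp only [Function.comp_apply]
    have h2 : 2 * Nat.succ k + 1 = (2 * k + 1) + 1 + 1 := by omega
    rw [h2, List.getD_cons_succ, List.getD_cons_succ]
  rw [hf]
  simp

theorem pvEvod_eq_chk : ∀ s, (pvEv s && pvOd s) = pvChk s := by
  refine pvTwoStep ?_ ?_ ?_
  · simp [pvEv, pvOd, pvChk]
  · intro a
    simp [pvEv, pvOd, pvChk]
  · intro a b t ih
    rw [pvEv_cons2, pvOd_cons2]
    show _ = pvChk (a :: b :: t)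
    rw [pvChk, ← ih]
    cases PySem.Int.mod a 3 == 0 <;> cases PySem.Int.mod b 5 == 0 <;>
      simp [Bool.and_comm]

-- ===== VERDICT (by name: the statement is the Claim_ definition above) =====
theorem pass_tests_spec : Claim_equal_pass_tests := by
  intro s _
  unfold Spec_pass_tests pass_tests
  rw [pvA_eq_chk, ← pvEvod_eq_chk, ← pvAlt_eq_evod]
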